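-- pv_equiv track=rewrite | github.com/daniel-reich/ubiquitous-fiesta | 2NPjN7DDvyi6f5CHF_17.py | age_difference
-- ===== SOURCE A (Python) =====
-- def age_difference(f_age, s_age):
--   count = 0
--   print ("F_age: " + str(f_age))
--   print ("S_age: " + str(s_age))
--   while ((f_age + count) > (2 * (s_age + count))):
--     count += 1
--   if (count == 0):
--     while ((f_age + count) < (2 * (s_age + count))):
--       count -= 1
--     count *= -1
--   return count
-- ===== SOURCE B (Python) =====
-- def age_difference(f_age, s_age):
--   print ("F_age: " + str(f_age))
--   print ("S_age: " + str(s_age))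
--   return abs(f_age - 2 * s_age)
-- ===== Notes on version B (the rewrite author's own statement) =====
-- stated objective: faster
-- what changed: Replaces the two counting loops (increment/decrement until f_age+count crosses 2*(s_age+count)) by the closed form abs(f_age - 2*s_age), keeping the prints.
import Mathlib
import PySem

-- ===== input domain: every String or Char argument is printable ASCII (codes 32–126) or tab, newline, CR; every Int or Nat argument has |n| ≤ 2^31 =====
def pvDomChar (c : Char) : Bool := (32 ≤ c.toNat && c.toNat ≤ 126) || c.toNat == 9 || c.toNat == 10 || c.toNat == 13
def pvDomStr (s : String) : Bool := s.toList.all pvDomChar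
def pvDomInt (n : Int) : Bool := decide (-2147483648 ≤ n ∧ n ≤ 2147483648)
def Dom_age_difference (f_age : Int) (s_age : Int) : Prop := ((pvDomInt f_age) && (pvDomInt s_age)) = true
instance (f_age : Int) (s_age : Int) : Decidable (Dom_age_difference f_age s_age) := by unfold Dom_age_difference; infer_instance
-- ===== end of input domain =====

-- B replaces A's two counting loops by the closed form abs(f_age - 2*s_age); prints omitted in
-- both ports (equivalence is about the return value; B performs the same prints as A).

-- ===== PORT A =====
-- first while loop: count += 1 while (f_age + count) > 2*(s_age + count)
-- (fuel only makes the recursion structural; with the fuel supplied below the loop always exits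
-- by its own condition, exactly as in Python)
def ageUpLoop (fuel : Nat) (f_age s_age count : Int) : Int :=
  match fuel with
  | 0 => count
  | n + 1 =>
    if f_age + count > 2 * (s_age + count) then ageUpLoop n f_age s_age (count + 1) else count

-- second while loop: count -= 1 while (f_age + count) < 2*(s_age + count)
def ageDownLoop (fuel : Nat) (f_age s_age count : Int) : Int :=
  match fuel with
  | 0 => count
  | n + 1 =>
    if f_age + count < 2 * (s_age + count) then ageDownLoop n f_age s_age (count - 1) else count

def age_difference (f_age : Int) (s_age : Int) : Int :=
  let count := ageUpLoop (f_age - 2 * s_age).toNat f_age s_age 0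
  if count = 0 then (ageDownLoop (2 * s_age - f_age).toNat f_age s_age count) * (-1) else count

-- ===== PORT B =====
def age_difference_alt (f_age : Int) (s_age : Int) : Int :=
  |f_age - 2 * s_age|

-- ===== PRECONDITION & SPEC =====
def Spec_age_difference (f_age : Int) (s_age : Int) (out : Int) : Prop := out = age_difference_alt f_age s_age
instance (f_age : Int) (s_age : Int) (out : Int) : Decidable (Spec_age_difference f_age s_age out) := by unfold Spec_age_difference; infer_instance

-- ===== CLAIM (what is proved, stated in full; the proofs are below) =====
def Claim_equal_age_difference : Prop := ∀ (f_age : Int) (s_age : Int), Dom_age_difference f_age s_age → Spec_age_difference f_age s_age (age_difference f_age s_age)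

-- ===== LEMMAS AND PROOFS =====
theorem ageUpLoop_eq (fuel : Nat) (f_age s_age count : Int)
    (hf : f_age - 2 * s_age - count ≤ (fuel : Int)) :
    ageUpLoop fuel f_age s_age count = max count (f_age - 2 * s_age) := by
  induction fuel generalizing count with
  | zero => simp only [ageUpLoop]; omega
  | succ n ih =>
    simp only [ageUpLoop]
    split_ifs with h
    · rw [ih (count + 1) (by omega)]; omega
    · omega

theorem ageDownLoop_eq (fuel : Nat) (f_age s_age count : Int)
    (hf : count - (f_age - 2 * s_age) ≤ (fuel : Int)) :
    ageDownLoop fuel f_age s_age count = min count (f_age - 2 * s_age) := by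
  induction fuel generalizing count with
  | zero => simp only [ageDownLoop]; omega
  | succ n ih =>
    simp only [ageDownLoop]
    split_ifs with h
    · rw [ih (count - 1) (by omega)]; omega
    · omega

-- ===== VERDICT (by name: the statement is the Claim_ definition above) =====
theorem age_difference_spec : Claim_equal_age_difference := by
  intro f s _
  unfold Spec_age_difference age_difference age_difference_alt
  rw [ageUpLoop_eq _ _ _ _ (by omega)]
  simp only []
  rw [ageDownLoop_eq _ _ _ _ (by omega)]
  rcases abs_cases (f - 2 * s) with ⟨h1, h2⟩ | ⟨h1, h2⟩ <;> split_ifs with h <;> omega
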